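-- pv_equiv track=rewrite | github.com/opensource02/SemDC | utils.py | list2bin
-- ===== SOURCE A (Python) =====
-- def list2bin(l, max_dim):
--     bin = []
--     for i in range(max_dim):
--         if i in l:
--             bin.append("1")
--         else:
--             bin.append("0")
--     return "".join(bin)
-- ===== SOURCE B (Python) =====
-- def list2bin(l, max_dim):
--     bin = ["0"] * max_dim
--     for i in l:
--         if 0 <= i < max_dim:
--             bin[i] = "1"
--     return "".join(bin)
-- ===== Notes on version B (the rewrite author's own statement) =====
-- stated objective: faster
-- what changed: B scatters: it preallocates a '0' buffer of length max_dim and sets position i to '1' for each in-range element of l, instead of A's scan of range(max_dim) with an O(len(l)) membership test per position.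
import Mathlib
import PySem

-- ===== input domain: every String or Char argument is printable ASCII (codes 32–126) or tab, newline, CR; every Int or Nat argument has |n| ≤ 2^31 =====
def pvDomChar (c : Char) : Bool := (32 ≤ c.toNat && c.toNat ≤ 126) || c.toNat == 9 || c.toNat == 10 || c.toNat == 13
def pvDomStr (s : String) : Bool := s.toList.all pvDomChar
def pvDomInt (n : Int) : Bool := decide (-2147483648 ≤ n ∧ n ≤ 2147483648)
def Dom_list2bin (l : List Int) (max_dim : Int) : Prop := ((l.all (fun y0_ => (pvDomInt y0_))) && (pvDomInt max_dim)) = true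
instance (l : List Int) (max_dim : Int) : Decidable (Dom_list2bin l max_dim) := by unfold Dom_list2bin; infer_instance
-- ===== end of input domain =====

-- B scatters '1's into a preallocated '0' buffer in one pass over l, instead of A's per-position membership scan; asymptotically faster.

-- ===== PORT A =====
-- bin = []; for i in range(max_dim): bin.append("1" if i in l else "0"); return "".join(bin)
def list2bin (l : List Int) (max_dim : Int) : String :=
  let bin : List String :=
    (PySem.List.pyRange 0 max_dim 1).foldl
      (fun bin i => bin ++ [if i ∈ l then "1" else "0"]) []
  PySem.Str.join "" bin

-- ===== PORT B =====
-- bin = ["0"] * max_dim (a buffer of one-char strings, represented as Char);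
-- for i in l: if 0 <= i < max_dim: bin[i] = "1";  return "".join(bin) (= the buffer's chars as a string)
def list2bin_alt (l : List Int) (max_dim : Int) : String :=
  let bin : List Char :=
    l.foldl (fun bin i => if 0 ≤ i ∧ i < max_dim then bin.set i.toNat '1' else bin)
      (List.replicate max_dim.toNat '0')
  String.ofList bin

-- ===== PRECONDITION & SPEC =====
def Spec_list2bin (l : List Int) (max_dim : Int) (out : String) : Prop := out = list2bin_alt l max_dim
instance (l : List Int) (max_dim : Int) (out : String) : Decidable (Spec_list2bin l max_dim out) := by unfold Spec_list2bin; infer_instance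

-- ===== CLAIM (what is proved, stated in full; the proofs are below) =====
def Claim_equal_list2bin : Prop := ∀ (l : List Int) (max_dim : Int), Dom_list2bin l max_dim → Spec_list2bin l max_dim (list2bin l max_dim)

-- ===== LEMMAS AND PROOFS =====

-- B's loop preserves the buffer length
theorem list2bin_alt_loop_length (m : Int) (l : List Int) (acc : List Char) :
    (l.foldl (fun bin i => if 0 ≤ i ∧ i < m then bin.set i.toNat '1' else bin) acc).length
      = acc.length := by
  induction l generalizing acc with
  | nil => rfl
  | cons x t ih => simp only [List.foldl_cons]; rw [ih]; split <;> simp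

-- pointwise characterisation of B's loop (via getD to avoid dependent index proofs)
theorem list2bin_alt_loop_getD (m : Int) (l : List Int) (acc : List Char) (k : Nat)
    (hk : k < acc.length) (hkm : (k : Int) < m) :
    (l.foldl (fun bin i => if 0 ≤ i ∧ i < m then bin.set i.toNat '1' else bin) acc).getD k '?'
      = if (k : Int) ∈ l then '1' else acc.getD k '?' := by
  induction l generalizing acc with
  | nil => simp
  | cons x t ih =>
    simp only [List.foldl_cons]
    by_cases hr : 0 ≤ x ∧ x < m
    · rw [if_pos hr]
      rw [ih (acc.set x.toNat '1') (by simp [hk])]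
      by_cases hx : x = (k : Int)
      · have hxk : x.toNat = k := by omega
        have hset : (acc.set x.toNat '1').getD k '?' = '1' := by
          simp [hxk, List.getD, hk]
        rw [hset]
        have hmem : (k : Int) ∈ x :: t := by simp [hx.symm]
        simp only [if_pos hmem]
        split <;> rfl
      · have hne : x.toNat ≠ k := by omega
        have hset : (acc.set x.toNat '1').getD k '?' = acc.getD k '?' := by
          simp [List.getD, hne]
        rw [hset]
        have hmem : ((k : Int) ∈ x :: t) ↔ ((k : Int) ∈ t) := by
          simp only [List.mem_cons]
          exact or_iff_right (fun h => hx h.symm)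
        simp only [hmem]
    · rw [if_neg hr]
      rw [ih acc hk]
      have hx : x ≠ (k : Int) := by omega
      have hmem : ((k : Int) ∈ x :: t) ↔ ((k : Int) ∈ t) := by
        simp only [List.mem_cons]
        exact or_iff_right (fun h => hx h.symm)
      simp only [hmem]

theorem list2bin_spec : Claim_equal_list2bin := by
  intro l m _
  unfold Spec_list2bin list2bin list2bin_alt
  simp only
  rw [PySem.List.foldl_append_singleton_eq_map, List.nil_append]
  -- A's joined string is the string of the mapped chars
  have htl : ((PySem.List.pyRange 0 m 1).map (fun i => if i ∈ l then "1" else "0")).map String.toList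
      = ((PySem.List.pyRange 0 m 1).map (fun i => if i ∈ l then '1' else '0')).map ([·]) := by
    simp only [List.map_map]
    apply List.map_congr_left
    intro i _
    simp only [Function.comp]
    split <;> rfl
  have hA : PySem.Str.join ""
      ((PySem.List.pyRange 0 m 1).map (fun i => if i ∈ l then "1" else "0"))
      = String.ofList ((PySem.List.pyRange 0 m 1).map (fun i => if i ∈ l then '1' else '0')) := by
    have h1 : (PySem.Str.join ""
        ((PySem.List.pyRange 0 m 1).map (fun i => if i ∈ l then "1" else "0"))).toList
        = (PySem.List.pyRange 0 m 1).map (fun i => if i ∈ l then '1' else '0') := by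
      rw [show (PySem.Str.join ""
            ((PySem.List.pyRange 0 m 1).map (fun i => if i ∈ l then "1" else "0"))).toList
          = PySem.Chars.join []
            (((PySem.List.pyRange 0 m 1).map (fun i => if i ∈ l then "1" else "0")).map String.toList)
          from by simp [PySem.Str.join]]
      rw [htl]
      exact PySem.Chars.join_nil_singletons _
    rw [← String.toList_inj, h1, String.toList_ofList]
  rw [hA]
  congr 1
  apply List.ext_getElem
  · rw [list2bin_alt_loop_length]
    simp [PySem.List.length_pyRange_one]
  · intro k h1 h2
    have hlen : k < (List.replicate m.toNat '0').length := by
      have := h2; rwa [list2bin_alt_loop_length] at this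
    have hkm : (k : Int) < m := by
      simp [PySem.List.length_pyRange_one] at h1; omega
    rw [← List.getD_eq_getElem _ '?' h2, ← List.getD_eq_getElem _ '?' h1]
    rw [list2bin_alt_loop_getD m l _ k hlen hkm]
    have hkn : k < m.toNat := by simpa using hlen
    have hrep : (List.replicate m.toNat '0').getD k '?' = '0' := by
      simp [List.getD, hkn]
    rw [hrep]
    rw [List.getD_eq_getElem _ '?' h1, List.getElem_map, PySem.List.getElem_pyRange_one]
    norm_num

-- ===== VERDICT (by name: the statement is the Claim_ definition above) =====
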